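-- pv_equiv track=rewrite | github.com/mkmrabby/Hackerrank | Algorithms/Picking_Numbers.py | pickingNumbers
-- ===== SOURCE A (Python) =====
-- def pickingNumbers(a):
--     # Write your code here
--     list1=[]
--     for i in a:
--         temp=0
--         for j in a:
--             if i<=j and (j-i)<=1:
--                 temp+=1
--         list1.append(temp)
--     return max(list1)
-- ===== SOURCE B (Python) =====
-- def pickingNumbers(a):
--     cnt = {}
--     for v in a:
--         cnt[v] = cnt.get(v, 0) + 1
--     return max(c + cnt.get(v + 1, 0) for v, c in cnt.items())
-- ===== Notes on version B (the rewrite author's own statement) =====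
-- stated objective: faster
-- what changed: Replaces the quadratic all-pairs counting (for each element, rescan the whole list) by a single frequency-counting pass and a max over count[v]+count[v+1] per distinct value.
import Mathlib
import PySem

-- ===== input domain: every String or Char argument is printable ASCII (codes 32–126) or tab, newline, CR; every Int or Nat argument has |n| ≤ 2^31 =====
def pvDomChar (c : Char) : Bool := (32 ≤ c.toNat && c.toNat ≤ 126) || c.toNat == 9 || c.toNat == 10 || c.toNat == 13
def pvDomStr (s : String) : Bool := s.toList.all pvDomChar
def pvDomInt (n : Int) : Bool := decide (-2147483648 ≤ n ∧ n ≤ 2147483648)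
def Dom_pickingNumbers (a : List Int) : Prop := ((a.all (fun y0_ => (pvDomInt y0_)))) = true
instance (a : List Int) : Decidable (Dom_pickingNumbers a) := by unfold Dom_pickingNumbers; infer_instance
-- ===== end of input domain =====

-- B replaces A's quadratic all-pairs rescan by one frequency-counting pass and max(count[v]+count[v+1]) over distinct values (faster, in a timing run).

-- ===== PORT A =====
def pickingNumbers (a : List Int) : Int :=
  let list1 := a.foldl (fun acc i =>
    acc ++ [a.foldl (fun temp j => if i ≤ j ∧ j - i ≤ 1 then temp + 1 else temp) (0 : Int)]) []
  (PySem.List.max? list1 (fun x => x)).getD 0   -- max(list1); Pre_ excludes the empty list, where Python raises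

-- ===== PORT B =====
def pickingNumbers_alt (a : List Int) : Int :=
  let cnt := a.foldl (fun d v => d.insert v (d.getD v 0 + 1)) (PySem.Dict.empty : PySem.Dict Int Int)
  (PySem.List.max? (cnt.items.map (fun p => p.2 + cnt.getD (p.1 + 1) 0)) (fun x => x)).getD 0

-- ===== PRECONDITION & SPEC =====
-- Pre_ excludes only the empty list, on which Python A (and B) raise ValueError in max().
def Pre_pickingNumbers (a : List Int) : Prop := a ≠ []
instance (a : List Int) : Decidable (Pre_pickingNumbers a) := by unfold Pre_pickingNumbers; infer_instance
def pvWitness_pickingNumbers : List Int := [1, 1, 2, 3]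

def Spec_pickingNumbers (a : List Int) (out : Int) : Prop := out = pickingNumbers_alt a
instance (a : List Int) (out : Int) : Decidable (Spec_pickingNumbers a out) := by unfold Spec_pickingNumbers; infer_instance

-- ===== CLAIM (what is proved, stated in full; the proofs are below) =====
def Claim_equal_pickingNumbers : Prop := ∀ (a : List Int), Dom_pickingNumbers a → Pre_pickingNumbers a → Spec_pickingNumbers a (pickingNumbers a)

-- ===== LEMMAS AND PROOFS =====

-- A's inner loop counts exactly the occurrences of i and i+1.
lemma countP_window (xs : List Int) (i : Int) :
    (xs.countP (fun j => decide (i ≤ j ∧ j - i ≤ 1)) : Int)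
      = (xs.count i : Int) + (xs.count (i + 1) : Int) := by
  induction xs with
  | nil => simp
  | cons x t ih =>
    rw [List.countP_cons, List.count_cons, List.count_cons]
    push_cast
    rw [ih]
    by_cases h1 : x = i
    · rw [if_pos (by subst h1; simp)]
      subst h1; simp; omega
    · by_cases h2 : x = i + 1
      · rw [if_pos (by subst h2; simp)]
        subst h2; simp [h1]; omega
      · rw [if_neg (by simp; omega)]
        simp [h1, h2]

-- the id-keyed max of two lists with the same members is the same
lemma max?_eq_of_mem_iff (l l' : List Int) (h : ∀ y, y ∈ l ↔ y ∈ l') :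
    PySem.List.max? l (fun x => x) = PySem.List.max? l' (fun x => x) := by
  cases hl : PySem.List.max? l (fun x => x) with
  | none =>
    have : l = [] := (PySem.List.max?_eq_none_iff l (fun x => x)).mp hl
    subst this
    have : l' = [] := by
      cases l' with
      | nil => rfl
      | cons x t => exact absurd ((h x).mpr (by simp)) (by simp)
    simp [this, PySem.List.max?]
  | some m =>
    cases hl' : PySem.List.max? l' (fun x => x) with
    | none =>
      have : l' = [] := (PySem.List.max?_eq_none_iff l' (fun x => x)).mp hl'
      subst this
      have hm := PySem.List.max?_mem hl
      exact absurd ((h m).mp hm) (by simp)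
    | some m' =>
      have hm : m ∈ l := PySem.List.max?_mem hl
      have hm' : m' ∈ l' := PySem.List.max?_mem hl'
      have h1 : m ≤ m' := PySem.List.max?_isMax hl' m ((h m).mp hm)
      have h2 : m' ≤ m := PySem.List.max?_isMax hl m' ((h m').mpr hm')
      have : m = m' := le_antisymm h1 h2
      rw [this]

-- ===== VERDICT (by name: the statement is the Claim_ definition above) =====
theorem pickingNumbers_spec : Claim_equal_pickingNumbers := by
  intro a _ _
  unfold Spec_pickingNumbers pickingNumbers pickingNumbers_alt
  rw [PySem.Dict.foldl_insert_getD_add_one_eq_counter]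
  simp only [PySem.List.foldl_append_singleton_eq_map, PySem.List.foldl_ite_add_one,
    PySem.Dict.items_counter, List.map_map, Function.comp_def, PySem.Dict.getD_counter,
    zero_add, countP_window]
  congr 1
  apply max?_eq_of_mem_iff
  intro y
  simp [List.mem_map, PySem.Set.mem_ofList]
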